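-- pv_equiv track=rewrite | github.com/abhineetjain13/Crawlwise | backend/app/services/extract/shared_variant_logic.py | _is_sequential_integer_run
-- ===== SOURCE A (Python) =====
-- def _is_sequential_integer_run(values: list[str]) -> bool:
--     """Return True when every value is a bare integer and the set forms a
--     contiguous run of >= 5 values.  This is the signature of a quantity
--     selector (1, 2, 3 … N), not a product variant axis."""
--     if len(values) < 5:
--         return False
--     ints: list[int] = []
--     for value in values:
--         stripped = value.strip()
--         if not stripped.isdigit():
--             return False
--         ints.append(int(stripped))
--     if not ints:
--         return False
--     ints.sort()
--     return ints[-1] - ints[0] == len(ints) - 1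
-- ===== SOURCE B (Python) =====
-- def _is_sequential_integer_run(values: list[str]) -> bool:
--     """Single pass keeping a running min/max instead of collecting the
--     integers into a list and sorting it."""
--     if len(values) < 5:
--         return False
--     lo = None
--     hi = None
--     for value in values:
--         stripped = value.strip()
--         if not stripped.isdigit():
--             return False
--         n = int(stripped)
--         if lo is None or n < lo:
--             lo = n
--         if hi is None or n > hi:
--             hi = n
--     return hi - lo == len(values) - 1
-- ===== Notes on version B (the rewrite author's own statement) =====
-- stated objective: alternative
-- what changed: B replaces collecting the ints into a list and sorting it with a single pass that keeps a running min and max and tests max-min == len(values)-1.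
import Mathlib
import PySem

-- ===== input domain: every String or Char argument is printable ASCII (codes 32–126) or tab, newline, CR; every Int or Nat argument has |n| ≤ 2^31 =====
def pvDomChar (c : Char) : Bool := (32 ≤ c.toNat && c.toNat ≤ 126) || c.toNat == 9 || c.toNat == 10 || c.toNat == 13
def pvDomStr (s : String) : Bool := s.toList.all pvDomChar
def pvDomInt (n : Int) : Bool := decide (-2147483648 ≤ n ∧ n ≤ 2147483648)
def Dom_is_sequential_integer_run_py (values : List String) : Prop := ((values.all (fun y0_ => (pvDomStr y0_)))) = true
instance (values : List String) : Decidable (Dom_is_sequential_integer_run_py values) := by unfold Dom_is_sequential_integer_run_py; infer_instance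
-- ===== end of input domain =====

-- B replaces A's collect-into-a-list-then-sort with a single pass keeping a running min/max (same observed cost).


-- ===== PORT A =====
-- int(stripped): on the ASCII domain isdigit() guarantees int() succeeds, so the
-- `.getD 0` default is unreachable inside Dom (outside Dom Python may raise ValueError).
def aCollect (values : List String) (acc : List Int) : Option (List Int) :=
  match values with
  | [] => some acc
  | v :: rest =>
    let stripped := PySem.Str.strip v
    if PySem.Str.strIsdigit stripped then
      aCollect rest (acc ++ [(PySem.Int.ofStr? stripped).getD 0])
    else none

def is_sequential_integer_run_py (values : List String) : Bool :=
  if values.length < 5 then false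
  else
    match aCollect values [] with
    | none => false
    | some ints =>
      if ints.isEmpty then false
      else
        let s := PySem.List.sorted ints (fun x => x) false
        match PySem.List.pyGet? s (-1) with
        | none => false
        | some last =>
          match PySem.List.pyGet? s 0 with
          | none => false
          | some hd => decide (last - hd = (ints.length : Int) - 1)

-- ===== PORT B =====
-- `if lo is None or n < lo: lo = n`
def updLo (lo : Option Int) (n : Int) : Option Int :=
  match lo with
  | none => some n
  | some l => if n < l then some n else some l

-- `if hi is None or n > hi: hi = n`
def updHi (hi : Option Int) (n : Int) : Option Int :=
  match hi with
  | none => some n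
  | some h => if n > h then some n else some h

def bScan (values : List String) (lo hi : Option Int) : Option (Option Int × Option Int) :=
  match values with
  | [] => some (lo, hi)
  | v :: rest =>
    let stripped := PySem.Str.strip v
    if PySem.Str.strIsdigit stripped then
      let n := (PySem.Int.ofStr? stripped).getD 0
      bScan rest (updLo lo n) (updHi hi n)
    else none

def is_sequential_integer_run_py_alt (values : List String) : Bool :=
  if values.length < 5 then false
  else
    match bScan values none none with
    | none => false
    | some st =>
      match st.1 with
      | none => false   -- lo still None: unreachable, the loop ran on ≥ 5 values
      | some lo =>
        match st.2 with
        | none => false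
        | some hi => decide (hi - lo = (values.length : Int) - 1)

-- ===== PRECONDITION & SPEC =====
def Spec_is_sequential_integer_run_py (values : List String) (out : Bool) : Prop := out = is_sequential_integer_run_py_alt values
instance (values : List String) (out : Bool) : Decidable (Spec_is_sequential_integer_run_py values out) := by unfold Spec_is_sequential_integer_run_py; infer_instance

-- ===== CLAIM (what is proved, stated in full; the proofs are below) =====
def Claim_equal_is_sequential_integer_run_py : Prop := ∀ (values : List String), Dom_is_sequential_integer_run_py values → Spec_is_sequential_integer_run_py values (is_sequential_integer_run_py values)

-- ===== LEMMAS AND PROOFS =====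

/-- the per-element conversion both loops perform -/
def pvVal (v : String) : Int := (PySem.Int.ofStr? (PySem.Str.strip v)).getD 0

/-- the per-element validity test both loops perform -/
def pvOk (v : String) : Bool := PySem.Str.strIsdigit (PySem.Str.strip v)

lemma updLo_none (n : Int) : updLo none n = some n := rfl

lemma updHi_none (n : Int) : updHi none n = some n := rfl

lemma updLo_some (l n : Int) : updLo (some l) n = some (min l n) := by
  unfold updLo; rw [min_def]; split_ifs <;> simp <;> omega

lemma updHi_some (h n : Int) : updHi (some h) n = some (max h n) := by
  unfold updHi; rw [max_def]; split_ifs <;> simp <;> omega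

lemma all_cons_of_ok {v : String} {rest : List String} (hv : pvOk v = true)
    (hrest : rest.all pvOk = true) : (v :: rest).all pvOk = true := by
  rw [List.all_cons, hv, hrest]; rfl

lemma not_all_cons_of_not_ok {v : String} {rest : List String} (hv : ¬ pvOk v = true) :
    ¬ (v :: rest).all pvOk = true := by
  rw [List.all_cons, Bool.and_eq_true]; intro hc; exact hv hc.1

lemma not_all_cons_of_not_rest {v : String} {rest : List String} (hrest : ¬ rest.all pvOk = true) :
    ¬ (v :: rest).all pvOk = true := by
  rw [List.all_cons, Bool.and_eq_true]; intro hc; exact hrest hc.2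

lemma aCollect_eq (values : List String) (acc : List Int) :
    aCollect values acc =
      if values.all pvOk then some (acc ++ values.map pvVal) else none := by
  induction values generalizing acc with
  | nil => simp [aCollect]
  | cons v rest ih =>
    rw [aCollect]
    by_cases hv : PySem.Str.strIsdigit (PySem.Str.strip v) = true
    · rw [if_pos hv, ih]
      by_cases hrest : rest.all pvOk = true
      · rw [if_pos hrest, if_pos (all_cons_of_ok hv hrest), List.map_cons,
          List.append_assoc, List.singleton_append]
        rfl
      · rw [if_neg hrest, if_neg (not_all_cons_of_not_rest hrest)]
    · rw [if_neg hv, if_neg (not_all_cons_of_not_ok hv)]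

lemma bScan_some (values : List String) (l h : Int) :
    bScan values (some l) (some h) =
      if values.all pvOk then
        some (some ((values.map pvVal).foldl min l), some ((values.map pvVal).foldl max h))
      else none := by
  induction values generalizing l h with
  | nil => simp [bScan]
  | cons v rest ih =>
    rw [bScan]
    by_cases hv : PySem.Str.strIsdigit (PySem.Str.strip v) = true
    · rw [if_pos hv]
      show bScan rest (updLo (some l) _) (updHi (some h) _) = _
      rw [updLo_some, updHi_some, ih]
      by_cases hrest : rest.all pvOk = true
      · rw [if_pos hrest, if_pos (all_cons_of_ok hv hrest), List.map_cons,
          List.foldl_cons, List.foldl_cons]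
        rfl
      · rw [if_neg hrest, if_neg (not_all_cons_of_not_rest hrest)]
    · rw [if_neg hv, if_neg (not_all_cons_of_not_ok hv)]

lemma bScan_none (values : List String) :
    bScan values none none =
      if values.all pvOk then
        match values.map pvVal with
        | [] => some (none, none)
        | x :: t => some (some (t.foldl min x), some (t.foldl max x))
      else none := by
  cases values with
  | nil => simp [bScan]
  | cons v rest =>
    rw [bScan]
    by_cases hv : PySem.Str.strIsdigit (PySem.Str.strip v) = true
    · rw [if_pos hv]
      show bScan rest (updLo none _) (updHi none _) = _
      rw [updLo_none, updHi_none, bScan_some]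
      by_cases hrest : rest.all pvOk = true
      · rw [if_pos hrest, if_pos (all_cons_of_ok hv hrest), List.map_cons]
        rfl
      · rw [if_neg hrest, if_neg (not_all_cons_of_not_rest hrest)]
    · rw [if_neg hv, if_neg (not_all_cons_of_not_ok hv)]

/-- the last element of a ≤-pairwise list is an upper bound -/
lemma pairwise_le_getLast : ∀ (l : List Int), l.Pairwise (· ≤ ·) → ∀ (hne : l ≠ [])
    (y : Int), y ∈ l → y ≤ l.getLast hne
  | [], _, hne, _, _ => absurd rfl hne
  | a :: t, hp, hne, y, hy => by
    rcases List.pairwise_cons.mp hp with ⟨ha, ht⟩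
    cases t with
    | nil =>
      have : y = a := by simpa using hy
      simp [this, List.getLast]
    | cons b u =>
      rw [List.getLast_cons (by simp)]
      rcases List.mem_cons.mp hy with rfl | hy'
      · exact ha _ (List.getLast_mem (by simp))
      · exact pairwise_le_getLast (b :: u) ht (by simp) y hy'

/-- head of sorted = running min, last of sorted = running max -/
lemma sorted_head_last (x : Int) (t : List Int) :
    ∃ (h : PySem.List.sorted (x :: t) (fun y => y) false ≠ []),
      (PySem.List.sorted (x :: t) (fun y => y) false).head h = t.foldl min x ∧
      (PySem.List.sorted (x :: t) (fun y => y) false).getLast h = t.foldl max x := by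
  have hperm : (PySem.List.sorted (x :: t) (fun y => y) false).Perm (x :: t) :=
    PySem.List.sorted_perm _ _ _
  have hne : PySem.List.sorted (x :: t) (fun y => y) false ≠ [] := by
    intro h; rw [h] at hperm; exact (List.cons_ne_nil x t) (List.Perm.nil_eq hperm).symm
  refine ⟨hne, ?_, ?_⟩
  · -- head = min
    obtain ⟨m, tl, hcons⟩ := List.exists_cons_of_ne_nil hne
    have hmle : ∀ y ∈ (x :: t), m ≤ y := PySem.List.key_head_sorted_le (x :: t) (fun y => y) hcons
    have hmmem : m ∈ (x :: t) := hperm.mem_iff.mp (by simp [hcons])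
    have hfmem : t.foldl min x = x ∨ t.foldl min x ∈ t := PySem.List.foldl_min_mem t x
    have hfle : t.foldl min x ≤ x ∧ ∀ y ∈ t, t.foldl min x ≤ y := PySem.List.foldl_min_le t x
    have h1 : m ≤ t.foldl min x := by
      rcases hfmem with h | h
      · rw [h]; exact hmle x (by simp)
      · exact hmle _ (by simp [h])
    have h2 : t.foldl min x ≤ m := by
      rcases List.mem_cons.mp hmmem with h | h
      · rw [h]; exact hfle.1
      · exact hfle.2 m h
    simp [hcons]; omega
  · -- last = max
    have hpw : (PySem.List.sorted (x :: t) (fun y => y) false).Pairwise (· ≤ ·) := by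
      simpa using PySem.List.sorted_pairwise (x :: t) (fun y => y)
    have hub : ∀ y ∈ (x :: t), y ≤ (PySem.List.sorted (x :: t) (fun y => y) false).getLast hne :=
      fun y hy => pairwise_le_getLast _ hpw hne y (hperm.mem_iff.mpr hy)
    have hlmem : (PySem.List.sorted (x :: t) (fun y => y) false).getLast hne ∈ (x :: t) :=
      hperm.mem_iff.mp (List.getLast_mem hne)
    have hfmem : t.foldl max x = x ∨ t.foldl max x ∈ t := PySem.List.foldl_max_mem t x
    have hfle : x ≤ t.foldl max x ∧ ∀ y ∈ t, y ≤ t.foldl max x := PySem.List.le_foldl_max t x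
    have h1 : (PySem.List.sorted (x :: t) (fun y => y) false).getLast hne ≤ t.foldl max x := by
      rcases List.mem_cons.mp hlmem with h | h
      · rw [h]; exact hfle.1
      · exact hfle.2 _ h
    have h2 : t.foldl max x ≤ (PySem.List.sorted (x :: t) (fun y => y) false).getLast hne := by
      rcases hfmem with h | h
      · rw [h]; exact hub x (by simp)
      · exact hub _ (by simp [h])
    omega

-- ===== VERDICT (by name: the statement is the Claim_ definition above) =====
theorem is_sequential_integer_run_py_spec : Claim_equal_is_sequential_integer_run_py := by
  intro values _
  unfold Spec_is_sequential_integer_run_py is_sequential_integer_run_py is_sequential_integer_run_py_alt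
  by_cases hlen : values.length < 5
  · simp [hlen]
  · simp only [hlen, if_false]
    rw [aCollect_eq, bScan_none]
    by_cases hall : values.all pvOk = true
    · rw [if_pos hall, if_pos hall]
      have hne : values ≠ [] := by intro h; rw [h] at hlen; simp at hlen
      obtain ⟨x, t, hxt⟩ : ∃ x t, values.map pvVal = x :: t := by
        cases hm : values.map pvVal with
        | nil => exact absurd (List.map_eq_nil_iff.mp hm) hne
        | cons a b => exact ⟨a, b, rfl⟩
      rw [hxt]
      obtain ⟨hne', hhead, hlast⟩ := sorted_head_last x t
      have hget0 : PySem.List.pyGet? (PySem.List.sorted (x :: t) (fun y => y) false) 0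
          = some (t.foldl min x) := by
        rw [PySem.List.pyGet?_zero, ← List.head?_eq_getElem?, ← hhead,
          List.head?_eq_some_head hne']
      have hgetm1 : PySem.List.pyGet? (PySem.List.sorted (x :: t) (fun y => y) false) (-1)
          = some (t.foldl max x) := by
        rw [PySem.List.pyGet?_neg_one, ← hlast, List.getLast?_eq_some_getLast hne']
      have hlen' : (x :: t).length = values.length := by
        rw [← hxt, List.length_map]
      simp only [List.nil_append, List.isEmpty_cons, Bool.false_eq_true, if_false,
        hget0, hgetm1, hlen']
    · rw [if_neg hall, if_neg hall]
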